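-- pv_equiv track=rewrite | github.com/octahedron00/CAFRI_some | _src/side_work/align_all_for_scoring.py | get_better_name
-- ===== SOURCE A (Python) =====
-- def get_better_name(before_name: str):
--
--     before_after_list = []
--
--     for i in range(10):
--         before_after_list.append((f"Vp{i}G", f"Vp{i:02d}G"))
--         before_after_list.append((f"Vo{i}G", f"Vo{i:02d}G"))
--
--     after_name = before_name
--     for before, after in before_after_list:
--         after_name = after_name.replace(before, after)
--
--     return after_name
-- ===== SOURCE B (Python) =====
-- def get_better_name(before_name: str):
--     out = []
--     i = 0
--     n = len(before_name)
--     while i < n: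
--         if (i + 3 < n and before_name[i] == 'V'
--                 and before_name[i + 1] in 'po'
--                 and before_name[i + 2] in '0123456789'
--                 and before_name[i + 3] == 'G'):
--             out.append(before_name[i:i + 2] + '0' + before_name[i + 2:i + 4])
--             i += 4
--         else:
--             out.append(before_name[i])
--             i += 1
--     return ''.join(out)
-- ===== Notes on version B (the rewrite author's own statement) =====
-- stated objective: alternative
-- what changed: Replaces the 20 sequential full-string str.replace passes over a generated (pattern, replacement) list with a single left-to-right scan that zero-pads each V[po]<digit>G group in place.
import Mathlib
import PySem

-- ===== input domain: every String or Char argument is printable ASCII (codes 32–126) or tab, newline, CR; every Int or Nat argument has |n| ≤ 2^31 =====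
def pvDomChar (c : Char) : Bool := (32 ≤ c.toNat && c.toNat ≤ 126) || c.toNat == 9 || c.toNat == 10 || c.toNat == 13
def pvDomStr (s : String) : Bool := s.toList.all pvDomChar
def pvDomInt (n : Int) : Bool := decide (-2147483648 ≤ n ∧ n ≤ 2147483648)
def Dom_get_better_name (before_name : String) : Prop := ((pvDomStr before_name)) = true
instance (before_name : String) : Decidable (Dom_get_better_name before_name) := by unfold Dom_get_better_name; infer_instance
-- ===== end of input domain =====

-- B replaces A's 20 sequential replace passes (one per hard-coded pattern) with a single
-- left-to-right scan that zero-pads each V[po]<digit>G group as it is encountered (alternative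
-- decomposition; return values proved equal on all inputs).

-- ===== PORT A =====
-- literal transliteration of A: build the 20 (before, after) pairs over range(10), then
-- fold str.replace over them (string contents handled on List Char, PySem's representation).
def get_better_name (before_name : String) : String :=
  let before_after_list : List (List Char × List Char) :=
    (PySem.List.pyRange 0 10 1).foldl (fun acc i =>
      (acc ++ [(['V','p'] ++ PySem.Int.toChars i ++ ['G'],
                ['V','p'] ++ PySem.Chars.zfill (PySem.Int.toChars i) 2 ++ ['G'])])
          ++ [(['V','o'] ++ PySem.Int.toChars i ++ ['G'],
                ['V','o'] ++ PySem.Chars.zfill (PySem.Int.toChars i) 2 ++ ['G'])]) []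
  String.ofList
    (before_after_list.foldl (fun an p => PySem.Chars.replace an p.1 p.2) before_name.toList)

-- ===== PORT B =====
def pvDigits : List Char := ['0','1','2','3','4','5','6','7','8','9']

-- one pass: at each position test for 'V', 'p'/'o', a digit, 'G'; if it matches, emit the
-- padded 5-char group and skip 4 positions, else emit one char and move on (Source B's while loop).
def goB : List Char → List Char
  | x :: c :: d :: e :: r =>
    if x = 'V' ∧ (c = 'p' ∨ c = 'o') ∧ d ∈ pvDigits ∧ e = 'G'
    then x :: c :: '0' :: d :: e :: goB r
    else x :: goB (c :: d :: e :: r)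
  | x :: t => x :: goB t
  | [] => []

def get_better_name_alt (before_name : String) : String :=
  String.ofList (goB before_name.toList)

-- ===== PRECONDITION & SPEC =====
def Spec_get_better_name (before_name : String) (out : String) : Prop := out = get_better_name_alt before_name
instance (before_name : String) (out : String) : Decidable (Spec_get_better_name before_name out) := by unfold Spec_get_better_name; infer_instance

-- ===== CLAIM (what is proved, stated in full; the proofs are below) =====
def Claim_equal_get_better_name : Prop := ∀ (before_name : String), Dom_get_better_name before_name → Spec_get_better_name before_name (get_better_name before_name)

-- ===== LEMMAS AND PROOFS =====
def repS (old new : List Char) : List Char → List Char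
  | [] => []
  | c :: t =>
    if old.isPrefixOf (c :: t) then new ++ repS old new (t.drop (old.length - 1))
    else c :: repS old new t
termination_by s => s.length
decreasing_by
  · simp only [List.length_drop, List.length_cons]; omega
  · simp

theorem go_spec (old new : List Char) (hold : old ≠ []) :
    ∀ fuel l acc, l.length ≤ fuel →
      PySem.Chars.replace.go old new fuel l acc = acc.reverse ++ repS old new l := by
  intro fuel
  induction fuel with
  | zero =>
    intro l acc hl
    have : l = [] := List.eq_nil_of_length_eq_zero (Nat.le_zero.mp hl)
    subst this
    simp [PySem.Chars.replace.go, repS]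
  | succ n ih =>
    intro l acc hl
    cases l with
    | nil => simp [PySem.Chars.replace.go, repS]
    | cons c t =>
      rw [PySem.Chars.replace.go]
      by_cases hp : old.isPrefixOf (c :: t)
      · rw [if_pos hp, repS, if_pos hp]
        have hpre : old <+: (c :: t) := List.isPrefixOf_iff_prefix.mp hp
        have hlen : 1 ≤ old.length := by
          cases old with
          | nil => exact absurd rfl hold
          | cons _ _ => simp
        have hdrop : (c :: t).drop old.length = t.drop (old.length - 1) := by
          cases old with
          | nil => exact absurd rfl hold
          | cons o os => simp
        rw [hdrop, ih _ _ (by simp only [List.length_drop]; simp at hl; omega)]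
        simp
      · rw [if_neg hp, repS, if_neg hp, ih _ _ (by simp at hl; omega)]
        simp

theorem replace_eq_repS (s old new : List Char) (hold : old ≠ []) :
    PySem.Chars.replace s old new = repS old new s := by
  rw [PySem.Chars.replace]
  rw [if_neg (by simp [List.isEmpty_iff]; exact hold)]
  rw [go_spec old new hold s.length s [] le_rfl]
  simp

def patOf (c d : Char) : List Char := ['V', c, d, 'G']

def padOf (c d : Char) : List Char := ['V', c, '0', d, 'G']

def applyP (P : List (Char × Char)) (s : List Char) : List Char :=
  P.foldl (fun s cd => repS (patOf cd.1 cd.2) (padOf cd.1 cd.2) s) s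

def fam (P : List (Char × Char)) : Prop :=
  ∀ cd ∈ P, (cd.1 = 'p' ∨ cd.1 = 'o') ∧ cd.2 ∈ pvDigits

theorem repS_cons_not_pre {old new : List Char} {x : Char} {t : List Char}
    (h : ¬ old <+: (x :: t)) : repS old new (x :: t) = x :: repS old new t := by
  rw [repS, if_neg (fun hb => h (List.isPrefixOf_iff_prefix.mp hb))]

theorem po_ne_V {c : Char} (hc : c = 'p' ∨ c = 'o') : c ≠ 'V' := by
  rcases hc with h | h <;> subst h <;> decide

theorem dig_ne_V {d : Char} (hd : d ∈ pvDigits) : d ≠ 'V' := by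
  intro h; subst h; simp [pvDigits] at hd

theorem dig_ne_G {d : Char} (hd : d ∈ pvDigits) : d ≠ 'G' := by
  intro h; subst h; simp [pvDigits] at hd

theorem pat_prefix_iff (c' d' x : Char) (t : List Char) :
    patOf c' d' <+: (x :: t) ↔ x = 'V' ∧ ∃ r, t = c' :: d' :: 'G' :: r := by
  constructor
  · intro h
    cases t with
    | nil => rcases h with ⟨u, hu⟩; simp [patOf] at hu
    | cons a t1 =>
      cases t1 with
      | nil => rcases h with ⟨u, hu⟩; simp [patOf] at hu
      | cons b t2 =>
        cases t2 with
        | nil => rcases h with ⟨u, hu⟩; simp [patOf] at hu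
        | cons e t3 =>
          simp [patOf, List.cons_prefix_cons] at h
          obtain ⟨h1, h2, h3, h4⟩ := h
          exact ⟨h1.symm, t3, by simp [h2, h3, ← h4]⟩
  · rintro ⟨hx, r, ht⟩
    subst hx; subst ht
    simp [patOf, List.cons_prefix_cons]

-- single pass over a non-matching block

theorem pass_block_ne {c' d' c d : Char} (hc : c = 'p' ∨ c = 'o') (hd : d ∈ pvDigits)
    (h : ¬ (c' = c ∧ d' = d)) (t : List Char) :
    repS (patOf c' d') (padOf c' d') ('V' :: c :: d :: 'G' :: t) =
      'V' :: c :: d :: 'G' :: repS (patOf c' d') (padOf c' d') t := by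
  rw [repS_cons_not_pre, repS_cons_not_pre, repS_cons_not_pre, repS_cons_not_pre]
  · rw [pat_prefix_iff]
    rintro ⟨h1, -⟩
    exact absurd h1 (by decide)
  · rw [pat_prefix_iff]
    rintro ⟨h1, -⟩
    exact dig_ne_V hd h1
  · rw [pat_prefix_iff]
    rintro ⟨h1, -⟩
    exact po_ne_V hc h1
  · rw [pat_prefix_iff]
    rintro ⟨-, r, hr⟩
    simp at hr
    exact h ⟨hr.1.symm, hr.2.1.symm⟩

theorem pass_match (c' d' : Char) (t : List Char) :
    repS (patOf c' d') (padOf c' d') ('V' :: c' :: d' :: 'G' :: t) =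
      padOf c' d' ++ repS (patOf c' d') (padOf c' d') t := by
  rw [repS, if_pos (List.isPrefixOf_iff_prefix.mpr (by rw [pat_prefix_iff]; exact ⟨rfl, t, rfl⟩))]
  simp [patOf]

theorem pass_padded {c' d' c d : Char} (hc : c = 'p' ∨ c = 'o') (hd : d ∈ pvDigits) (t : List Char) :
    repS (patOf c' d') (padOf c' d') ('V' :: c :: '0' :: d :: 'G' :: t) =
      'V' :: c :: '0' :: d :: 'G' :: repS (patOf c' d') (padOf c' d') t := by
  rw [repS_cons_not_pre, repS_cons_not_pre, repS_cons_not_pre, repS_cons_not_pre, repS_cons_not_pre]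
  · rw [pat_prefix_iff]
    rintro ⟨h1, -⟩
    exact absurd h1 (by decide)
  · rw [pat_prefix_iff]
    rintro ⟨h1, -⟩
    exact dig_ne_V hd h1
  · rw [pat_prefix_iff]
    rintro ⟨h1, -⟩
    exact absurd h1 (by decide)
  · rw [pat_prefix_iff]
    rintro ⟨h1, -⟩
    exact po_ne_V hc h1
  · rw [pat_prefix_iff]
    rintro ⟨-, r, hr⟩
    simp at hr
    exact dig_ne_G hd hr.2.2.1

def codes : List (Char × Char) :=
  [('p','0'),('o','0'),('p','1'),('o','1'),('p','2'),('o','2'),('p','3'),('o','3'),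
   ('p','4'),('o','4'),('p','5'),('o','5'),('p','6'),('o','6'),('p','7'),('o','7'),
   ('p','8'),('o','8'),('p','9'),('o','9')]

theorem fam_codes : fam codes := by
  intro cd hcd
  fin_cases hcd <;> exact ⟨by decide, by decide⟩

theorem applyP_nil (P : List (Char × Char)) : applyP P [] = [] := by
  induction P with
  | nil => rfl
  | cons cd P ih => simpa [applyP, List.foldl, repS] using ih

theorem applyP_cons (cd : Char × Char) (P : List (Char × Char)) (s : List Char) :
    applyP (cd :: P) s = applyP P (repS (patOf cd.1 cd.2) (padOf cd.1 cd.2) s) := rfl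

theorem applyP_padded {c d : Char} (hc : c = 'p' ∨ c = 'o') (hd : d ∈ pvDigits)
    {P : List (Char × Char)} (hP : fam P) (t : List Char) :
    applyP P ('V' :: c :: '0' :: d :: 'G' :: t) =
      'V' :: c :: '0' :: d :: 'G' :: applyP P t := by
  induction P generalizing t with
  | nil => rfl
  | cons cd P ih =>
    rw [applyP_cons, applyP_cons, pass_padded hc hd]
    exact ih (fun x hx => hP x (List.mem_cons_of_mem _ hx)) _

theorem applyP_block {c d : Char} (hc : c = 'p' ∨ c = 'o') (hd : d ∈ pvDigits)
    {P : List (Char × Char)} (hP : fam P) (t : List Char) :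
    applyP P ('V' :: c :: d :: 'G' :: t) =
      (if (c, d) ∈ P then padOf c d else patOf c d) ++ applyP P t := by
  induction P generalizing t with
  | nil => simp [applyP, patOf]
  | cons cd P ih =>
    obtain ⟨c', d'⟩ := cd
    by_cases hm : c' = c ∧ d' = d
    · obtain ⟨rfl, rfl⟩ := hm
      rw [applyP_cons]
      simp only
      rw [pass_match]
      have : padOf c' d' ++ repS (patOf c' d') (padOf c' d') t =
          'V' :: c' :: '0' :: d' :: 'G' :: repS (patOf c' d') (padOf c' d') t := by
        simp [padOf]
      rw [this, applyP_padded hc hd (fun x hx => hP x (List.mem_cons_of_mem _ hx))]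
      rw [if_pos (List.mem_cons_self)]
      rw [applyP_cons]
      simp [padOf]
    · rw [applyP_cons]
      simp only
      rw [pass_block_ne hc hd hm, ih (fun x hx => hP x (List.mem_cons_of_mem _ hx))]
      have hne : (c, d) ≠ (c', d') := by
        intro hq
        simp only [Prod.mk.injEq] at hq
        exact hm ⟨hq.1.symm, hq.2.symm⟩
      rw [applyP_cons]
      simp [List.mem_cons, hne]

def tailBlock (t : List Char) : Prop :=
  ∃ c d r, t = c :: d :: 'G' :: r ∧ (c = 'p' ∨ c = 'o') ∧ d ∈ pvDigits

theorem tailBlock_repS (c' d' : Char) (t : List Char)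
    (h : tailBlock (repS (patOf c' d') (padOf c' d') t)) : tailBlock t := by
  obtain ⟨c, d, r, ht, hc, hd⟩ := h
  cases t with
  | nil => rw [repS] at ht; exact absurd ht (by simp)
  | cons a t0 =>
    by_cases hp : patOf c' d' <+: (a :: t0)
    · rw [pat_prefix_iff] at hp
      obtain ⟨rfl, r0, rfl⟩ := hp
      rw [pass_match] at ht
      simp [padOf] at ht
    · rw [repS_cons_not_pre hp] at ht
      obtain ⟨rfl, ht⟩ : a = c ∧ repS (patOf c' d') (padOf c' d') t0 = d :: 'G' :: r := by
        simpa using ht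
      cases t0 with
      | nil => rw [repS] at ht; exact absurd ht (by simp)
      | cons b t1 =>
        by_cases hp2 : patOf c' d' <+: (b :: t1)
        · rw [pat_prefix_iff] at hp2
          obtain ⟨rfl, r1, rfl⟩ := hp2
          rw [pass_match] at ht
          simp [padOf] at ht
          exact absurd ht.1.symm (dig_ne_V hd)
        · rw [repS_cons_not_pre hp2] at ht
          obtain ⟨rfl, ht⟩ : b = d ∧ repS (patOf c' d') (padOf c' d') t1 = 'G' :: r := by
            simpa using ht
          cases t1 with
          | nil => rw [repS] at ht; exact absurd ht (by simp)
          | cons e t2 =>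
            by_cases hp3 : patOf c' d' <+: (e :: t2)
            · rw [pat_prefix_iff] at hp3
              obtain ⟨rfl, r2, rfl⟩ := hp3
              rw [pass_match] at ht
              simp [padOf] at ht
            · rw [repS_cons_not_pre hp3] at ht
              obtain ⟨rfl, -⟩ : e = 'G' ∧ repS (patOf c' d') (padOf c' d') t2 = r := by
                simpa using ht
              exact ⟨_, _, t2, rfl, hc, hd⟩

theorem applyP_step {P : List (Char × Char)} (hP : fam P) (x : Char) (t : List Char)
    (h : ¬ (x = 'V' ∧ tailBlock t)) : applyP P (x :: t) = x :: applyP P t := by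
  induction P generalizing t with
  | nil => rfl
  | cons cd P ih =>
    obtain ⟨hcd1, hcd2⟩ := hP cd List.mem_cons_self
    rw [applyP_cons, applyP_cons]
    rw [repS_cons_not_pre (fun hp => by
      rw [pat_prefix_iff] at hp
      obtain ⟨rfl, r, rfl⟩ := hp
      exact h ⟨rfl, cd.1, cd.2, r, rfl, hcd1, hcd2⟩)]
    exact ih (fun y hy => hP y (List.mem_cons_of_mem _ hy)) _
      (fun hh => h ⟨hh.1, tailBlock_repS _ _ _ hh.2⟩)

theorem mem_codes {c d : Char} (hc : c = 'p' ∨ c = 'o') (hd : d ∈ pvDigits) :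
    (c, d) ∈ codes := by
  rcases hc with rfl | rfl <;> fin_cases hd <;> decide

theorem applyP_codes_eq_goB_aux :
    ∀ n (s : List Char), s.length ≤ n → applyP codes s = goB s := by
  intro n
  induction n with
  | zero =>
    intro s hs
    have : s = [] := List.eq_nil_of_length_eq_zero (Nat.le_zero.mp hs)
    subst this
    rw [applyP_nil]; rfl
  | succ n ih =>
    intro s hs
    cases s with
    | nil => rw [applyP_nil]; rfl
    | cons x t =>
      by_cases hb : x = 'V' ∧ tailBlock t
      · obtain ⟨rfl, c, d, r, rfl, hc, hd⟩ := hb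
        rw [applyP_block hc hd fam_codes, if_pos (mem_codes hc hd)]
        rw [ih r (by simp at hs; omega)]
        conv_rhs => rw [goB]
        rw [if_pos ⟨rfl, hc, hd, rfl⟩]
        simp [padOf]
      · rw [applyP_step fam_codes x t hb, ih t (by simp at hs; omega)]
        cases t with
        | nil => rfl
        | cons a t1 =>
          cases t1 with
          | nil => rfl
          | cons b t2 =>
            cases t2 with
            | nil => rfl
            | cons e t3 =>
              conv_rhs => rw [goB]
              rw [if_neg]
              rintro ⟨hx, hca, hdb, rfl⟩
              exact hb ⟨hx, a, b, t3, rfl, hca, hdb⟩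

theorem applyP_codes_eq_goB (s : List Char) : applyP codes s = goB s :=
  applyP_codes_eq_goB_aux s.length s le_rfl

theorem foldl_replace_eq_repS (ps : List (List Char × List Char))
    (h : ∀ p ∈ ps, p.1 ≠ []) :
    ∀ s, ps.foldl (fun an p => PySem.Chars.replace an p.1 p.2) s =
      ps.foldl (fun an p => repS p.1 p.2 an) s := by
  induction ps with
  | nil => intro s; rfl
  | cons p ps ih =>
    intro s
    rw [List.foldl_cons, List.foldl_cons,
      replace_eq_repS _ _ _ (h p List.mem_cons_self)]
    exact ih (fun q hq => h q (List.mem_cons_of_mem _ hq)) _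

theorem pairs_eval :
    ((PySem.List.pyRange 0 10 1).foldl (fun acc i =>
      (acc ++ [(['V','p'] ++ PySem.Int.toChars i ++ ['G'],
                ['V','p'] ++ PySem.Chars.zfill (PySem.Int.toChars i) 2 ++ ['G'])])
          ++ [(['V','o'] ++ PySem.Int.toChars i ++ ['G'],
                ['V','o'] ++ PySem.Chars.zfill (PySem.Int.toChars i) 2 ++ ['G'])]) []) =
    codes.map (fun cd => (patOf cd.1 cd.2, padOf cd.1 cd.2)) := by
  decide

theorem portA_eq (s : String) :
    get_better_name s = String.ofList (applyP codes s.toList) := by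
  simp only [get_better_name]
  rw [pairs_eval, foldl_replace_eq_repS _ (by decide), List.foldl_map]
  rfl

-- ===== VERDICT (by name: the statement is the Claim_ definition above) =====
theorem get_better_name_spec : Claim_equal_get_better_name := by
  intro s _
  unfold Spec_get_better_name
  rw [portA_eq]
  simp only [get_better_name_alt]
  rw [applyP_codes_eq_goB]
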